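-- pv_equiv track=rewrite | github.com/AragornBFRer/MDCP | notebook/paper_figures/plot_cov_shift.py | _prepare_method_list
-- ===== SOURCE A (Python) =====
-- from typing import Dict, Iterable, List, Optional, Sequence, Tuple
--
-- METHOD_BASELINE_AGG = "Baseline agg"
--
-- METHOD_BASELINE_SRC_PREFIX = "Baseline src "
--
-- METHOD_MDCP = "MDCP"
--
-- METHOD_MDCP_TUNED = "MDCP tuned"
--
-- def _prepare_method_list(methods_present: Iterable[str], include_tuned: bool) -> List[str]:
--     methods = []
--     unique = set(methods_present)
--
--     if METHOD_BASELINE_AGG in unique: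
--         methods.append(METHOD_BASELINE_AGG)
--
--     baseline_src = sorted(
--         (m for m in unique if m.startswith(METHOD_BASELINE_SRC_PREFIX)),
--         key=lambda s: int(s.replace(METHOD_BASELINE_SRC_PREFIX, "").strip() or "0"),
--     )
--     methods.extend(baseline_src)
--
--     if METHOD_MDCP in unique:
--         methods.append(METHOD_MDCP)
--
--     if include_tuned and METHOD_MDCP_TUNED in unique:
--         methods.append(METHOD_MDCP_TUNED)
--
--     return methods
-- ===== SOURCE B (Python) =====
-- # B: one ordered dedup + one filter + a single key-based sort (rank, numeric) instead of
-- # four explicit append branches with a separate sub-sort.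
-- from typing import Iterable, List
--
-- METHOD_BASELINE_AGG = "Baseline agg"
-- METHOD_BASELINE_SRC_PREFIX = "Baseline src "
-- METHOD_MDCP = "MDCP"
-- METHOD_MDCP_TUNED = "MDCP tuned"
--
--
-- def _rank(m: str) -> int:
--     if m == METHOD_BASELINE_AGG:
--         return 0
--     if m.startswith(METHOD_BASELINE_SRC_PREFIX):
--         return 1
--     if m == METHOD_MDCP:
--         return 2
--     if m == METHOD_MDCP_TUNED:
--         return 3
--     return -1
--
--
-- def _num(m: str) -> int:
--     if m.startswith(METHOD_BASELINE_SRC_PREFIX):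
--         return int(m.replace(METHOD_BASELINE_SRC_PREFIX, "").strip() or "0")
--     return 0
--
--
-- def _prepare_method_list(methods_present: Iterable[str], include_tuned: bool) -> List[str]:
--     recognized = [
--         m
--         for m in dict.fromkeys(methods_present)
--         if _rank(m) >= 0 and (include_tuned or m != METHOD_MDCP_TUNED)
--     ]
--     return sorted(recognized, key=lambda m: (_rank(m), _num(m)))
-- ===== Notes on version B (the rewrite author's own statement) =====
-- stated objective: simpler
-- what changed: Replaces A's four explicit append branches plus a separate sub-sort of the baseline-src names by one ordered dedup, one filter to the recognized categories, and a single sort keyed by (category_rank, numeric_index).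
-- outside the precondition, e.g. on _prepare_method_list(['Baseline src x'], True): A raises ValueError, B raises ValueError
import Mathlib
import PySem

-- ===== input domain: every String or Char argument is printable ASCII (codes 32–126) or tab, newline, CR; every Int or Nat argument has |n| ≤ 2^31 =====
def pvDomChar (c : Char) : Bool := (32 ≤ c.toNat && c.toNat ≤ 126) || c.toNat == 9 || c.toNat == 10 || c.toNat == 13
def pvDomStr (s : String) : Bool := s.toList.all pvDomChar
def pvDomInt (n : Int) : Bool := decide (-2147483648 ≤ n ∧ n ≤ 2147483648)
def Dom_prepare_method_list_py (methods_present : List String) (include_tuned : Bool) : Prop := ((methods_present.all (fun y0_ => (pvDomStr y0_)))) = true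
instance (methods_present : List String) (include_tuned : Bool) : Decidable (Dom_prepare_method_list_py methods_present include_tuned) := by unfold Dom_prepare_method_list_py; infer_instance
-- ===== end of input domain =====

-- B replaces A's four append branches + separate sub-sort by one dedup, one filter and a single
-- (category_rank, numeric_index)-keyed sort; objective: simpler, same cost.

-- ===== PORT A =====
-- key of A's sorted(): int(s.replace(PREFIX, "").strip() or "0"); total form via getD — the
-- inputs where Python's int() raises ValueError are excluded by Pre_ below.
def pvSrcKey (m : String) : Int :=
  let t := PySem.Str.strip (PySem.Str.replace m "Baseline src " "")
  (PySem.Int.ofStr? (if t = "" then "0" else t)).getD 0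

def prepare_method_list_py (methods_present : List String) (include_tuned : Bool) : List String :=
  let unique := PySem.Set.ofList methods_present
  let methods : List String :=
    if PySem.Set.contains unique "Baseline agg" then ["Baseline agg"] else []
  let baseline_src :=
    PySem.List.sorted (unique.filter (fun m => PySem.Str.startswith m "Baseline src ")) pvSrcKey false
  let methods := methods ++ baseline_src
  let methods := if PySem.Set.contains unique "MDCP" then methods ++ ["MDCP"] else methods
  if include_tuned && PySem.Set.contains unique "MDCP tuned" then methods ++ ["MDCP tuned"] else methods

-- ===== PORT B =====
def pvRank (m : String) : Int :=
  if m = "Baseline agg" then 0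
  else if PySem.Str.startswith m "Baseline src " then 1
  else if m = "MDCP" then 2
  else if m = "MDCP tuned" then 3
  else -1

def pvNum (m : String) : Int :=
  if PySem.Str.startswith m "Baseline src " then pvSrcKey m else 0

def prepare_method_list_py_alt (methods_present : List String) (include_tuned : Bool) : List String :=
  let recognized :=
    (PySem.List.dedup methods_present).filter
      (fun m => decide (0 ≤ pvRank m) && (include_tuned || !(m == "MDCP tuned")))
  PySem.List.sorted2 recognized pvRank pvNum false

-- ===== PRECONDITION & SPEC =====
-- Pre_ excludes inputs where Python's int() raises ValueError on a malformed 'Baseline src' suffix, and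
-- inputs holding two distinct 'Baseline src' names with the same numeric index, whose relative order in
-- A's output is an accident of set hash order.
def Pre_prepare_method_list_py (methods_present : List String) (include_tuned : Bool) : Prop :=
  (∀ m ∈ methods_present, PySem.Str.startswith m "Baseline src " = true →
      PySem.Int.ofStr?
        (let t := PySem.Str.strip (PySem.Str.replace m "Baseline src " "");
         if t = "" then "0" else t) ≠ none) ∧
  (∀ m ∈ methods_present, ∀ n ∈ methods_present,
      PySem.Str.startswith m "Baseline src " = true →
      PySem.Str.startswith n "Baseline src " = true →
      pvSrcKey m = pvSrcKey n → m = n)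
instance (methods_present : List String) (include_tuned : Bool) : Decidable (Pre_prepare_method_list_py methods_present include_tuned) := by unfold Pre_prepare_method_list_py; infer_instance

def pvWitness_prepare_method_list_py : List String × Bool :=
  (["MDCP tuned", "Baseline src 10", "Baseline src 2", "Baseline agg", "MDCP"], true)

def Spec_prepare_method_list_py (methods_present : List String) (include_tuned : Bool) (out : List String) : Prop := out = prepare_method_list_py_alt methods_present include_tuned
instance (methods_present : List String) (include_tuned : Bool) (out : List String) : Decidable (Spec_prepare_method_list_py methods_present include_tuned out) := by unfold Spec_prepare_method_list_py; infer_instance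

-- ===== CLAIM (what is proved, stated in full; the proofs are below) =====
def Claim_equal_prepare_method_list_py : Prop := ∀ (methods_present : List String) (include_tuned : Bool), Dom_prepare_method_list_py methods_present include_tuned → Pre_prepare_method_list_py methods_present include_tuned → Spec_prepare_method_list_py methods_present include_tuned (prepare_method_list_py methods_present include_tuned)

-- ===== LEMMAS AND PROOFS =====

-- the four category tests, as Bool predicates on a name
def pvIsSrc (m : String) : Bool := PySem.Str.startswith m "Baseline src "

theorem pv_agg_not_src : pvIsSrc "Baseline agg" = false := by decide
theorem pv_tuned_not_src : pvIsSrc "MDCP tuned" = false := by decide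

-- filter by equality on a duplicate-free list is the singleton (or nothing)
theorem pv_filter_beq_of_nodup {α : Type} [DecidableEq α] (l : List α) (h : l.Nodup) (a : α) :
    l.filter (fun x => x == a) = if a ∈ l then [a] else [] := by
  induction l with
  | nil => simp
  | cons x xs ih =>
    simp only [List.nodup_cons] at h
    by_cases hx : x = a
    · subst hx
      have hfe : List.filter (fun y => y == x) xs = [] :=
        List.filter_eq_nil_iff.mpr (fun b hb => by
          simp only [beq_iff_eq]
          exact fun hba => h.1 (hba ▸ hb))
      rw [List.filter_cons_of_pos (by simp), hfe, if_pos (List.mem_cons_self)]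
    · have hxa : a ≠ x := fun h2 => hx h2.symm
      rw [List.filter_cons_of_neg (by simp [hx]), ih h.2]
      by_cases hm : a ∈ xs <;> simp [hm, List.mem_cons, hxa]

-- count of an element in a filtered list, total form
theorem pv_count_filter {α : Type} [DecidableEq α] (p : α → Bool) (l : List α) (a : α) :
    List.count a (l.filter p) = if p a then List.count a l else 0 := by
  by_cases h : p a
  · simp [h, List.count_filter]
  · simp only [h]
    exact List.count_eq_zero.mpr (fun hm => h (List.of_mem_filter hm))

-- B's filter test is the disjunction of the four category tests
theorem pv_qB_eq (it : Bool) (m : String) :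
    (decide (0 ≤ pvRank m) && (it || !(m == "MDCP tuned")))
      = ((m == "Baseline agg") || pvIsSrc m || (m == "MDCP") || (it && (m == "MDCP tuned"))) := by
  by_cases h0 : m = "Baseline agg"
  · subst h0; cases it <;> decide
  · by_cases h1 : PySem.Str.startswith m "Baseline src " = true
    · have h3 : m ≠ "MDCP tuned" := fun h => by subst h; exact absurd h1 (by decide)
      have htr : pvIsSrc m = true := h1
      have ht : (m == "MDCP tuned") = false := by simp [h3]
      rw [pvRank, if_neg h0, if_pos h1]
      simp [htr, ht]
    · by_cases h2 : m = "MDCP"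
      · subst h2; cases it <;> decide
      · by_cases h3 : m = "MDCP tuned"
        · subst h3; cases it <;> decide
        · have hf : pvIsSrc m = false := Bool.eq_false_iff.mpr h1
          rw [pvRank, if_neg h0, if_neg h1, if_neg h2, if_neg h3]
          simp [hf, h0, h2, h3]

-- rank/num of each category's members
theorem pv_rank_agg : pvRank "Baseline agg" = 0 := by decide
theorem pv_rank_src {m : String} (h : pvIsSrc m = true) : pvRank m = 1 := by
  simp only [pvIsSrc] at h
  have h0 : m ≠ "Baseline agg" := fun he => by subst he; exact absurd h (by decide)
  rw [pvRank, if_neg h0, if_pos h]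
theorem pv_num_src {m : String} (h : pvIsSrc m = true) : pvNum m = pvSrcKey m := by
  simp only [pvIsSrc] at h
  rw [pvNum, if_pos h]
theorem pv_rank_mdcp : pvRank "MDCP" = 2 := by decide
theorem pv_rank_tuned : pvRank "MDCP tuned" = 3 := by decide

-- the lexicographic key of B's sort
def pvKeyLex (m : String) : Int ×ₗ Int := toLex (pvRank m, pvNum m)

-- the lexicographic order on Int pairs, by its two constructors
theorem pv_lex_lt {x1 x2 y1 y2 : Int} (h : x1 < y1 ∨ (x1 = y1 ∧ x2 < y2)) :
    (toLex (x1, x2) : Int ×ₗ Int) < toLex (y1, y2) := by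
  rcases h with h | ⟨h1, h2⟩
  · exact Prod.Lex.left _ _ h
  · subst h1; exact Prod.Lex.right _ h2

theorem pv_lt_of_rank {a b : String} (h : pvRank a < pvRank b) : pvKeyLex a < pvKeyLex b :=
  pv_lex_lt (Or.inl h)

theorem pv_src_strict {a b : String} (hsa : pvIsSrc a = true) (hsb : pvIsSrc b = true)
    (hle : pvSrcKey a ≤ pvSrcKey b) (hne : pvSrcKey a ≠ pvSrcKey b) :
    pvKeyLex a < pvKeyLex b := by
  have h2 : pvNum a < pvNum b := by
    rw [pv_num_src hsa, pv_num_src hsb]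
    exact lt_of_le_of_ne hle hne
  exact pv_lex_lt (Or.inr ⟨(pv_rank_src hsa).trans (pv_rank_src hsb).symm, h2⟩)

-- sorted2's lexicographic comparison, written as decide on the Lex order
theorem pv_before_eq {α : Type} (k1 k2 : α → Int) (a b : α) :
    (decide (k1 a < k1 b) || (!decide (k1 b < k1 a) && decide (k2 a < k2 b)))
      = decide ((toLex (k1 a, k2 a) : Int ×ₗ Int) < toLex (k1 b, k2 b)) := by
  have h : ((toLex (k1 a, k2 a) : Int ×ₗ Int) < toLex (k1 b, k2 b))
      ↔ (k1 a < k1 b ∨ (k1 a = k1 b ∧ k2 a < k2 b)) := Prod.Lex.toLex_lt_toLex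
  rw [Bool.eq_iff_iff]
  simp only [Bool.or_eq_true, Bool.and_eq_true, Bool.not_eq_true', decide_eq_true_eq,
    decide_eq_false_iff_not, h]
  omega

-- sorted2 (tuple key) is sorted with the lexicographic key
theorem pv_sorted2_eq_sorted_lex {α : Type} (xs : List α) (k1 k2 : α → Int) :
    PySem.List.sorted2 xs k1 k2 false
      = PySem.List.sorted xs (fun a => (toLex (k1 a, k2 a) : Int ×ₗ Int)) false := by
  have h1 : PySem.List.sorted2 xs k1 k2 false
      = xs.foldl (fun acc x => PySem.List.insertBy
          (fun a b => decide (k1 a < k1 b) || (!decide (k1 b < k1 a) && decide (k2 a < k2 b)))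
          x acc) [] := rfl
  have h2 : PySem.List.sorted xs (fun a => (toLex (k1 a, k2 a) : Int ×ₗ Int)) false
      = xs.foldl (fun acc x => PySem.List.insertBy
          (fun a b => decide ((toLex (k1 a, k2 a) : Int ×ₗ Int) < toLex (k1 b, k2 b)))
          x acc) [] :=
    PySem.List.sorted_eq_foldl_insertBy xs _
  rw [h1, h2]
  exact congrArg (fun f => List.foldl (fun acc x => PySem.List.insertBy f x acc) [] xs)
    (funext fun a => funext fun b => pv_before_eq k1 k2 a b)

-- the four disjoint filters, concatenated, are a permutation of the single filter
theorem pv_perm_four (u : List String) (it : Bool) :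
    (u.filter (fun x => x == "Baseline agg") ++ u.filter pvIsSrc
      ++ u.filter (fun x => x == "MDCP")
      ++ u.filter (fun x => it && (x == "MDCP tuned"))).Perm
      (u.filter (fun m => (m == "Baseline agg") || pvIsSrc m || (m == "MDCP")
          || (it && (m == "MDCP tuned")))) := by
  rw [List.perm_iff_count]
  intro a
  simp only [List.count_append, pv_count_filter]
  by_cases h0 : a = "Baseline agg"
  · subst h0; cases it <;> simp [pv_agg_not_src]
  · by_cases h1 : pvIsSrc a
    · have h2 : a ≠ "MDCP" := fun h => by rw [h] at h1; exact absurd h1 (by decide)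
      have h3 : a ≠ "MDCP tuned" := fun h => by rw [h] at h1; exact absurd h1 (by decide)
      simp [h0, h1, h2, h3]
    · by_cases h2 : a = "MDCP"
      · subst h2; cases it <;> simp [h1]
      · by_cases h3 : a = "MDCP tuned"
        · subst h3; cases it <;> simp [pv_tuned_not_src]
        · simp [h0, h1, h2, h3]

-- membership in a singleton-if block
theorem pv_mem_if {c : Prop} [Decidable c] {a m : String}
    (h : m ∈ (if c then [a] else [])) : m = a := by
  split at h <;> simp_all

-- ===== VERDICT (by name: the statement is the Claim_ definition above) =====
set_option maxHeartbeats 1000000 in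
theorem prepare_method_list_py_spec : Claim_equal_prepare_method_list_py := by
  intro mp it _ hpre
  unfold Spec_prepare_method_list_py
  set u := PySem.Set.ofList mp with hu
  have hnodup : u.Nodup := PySem.Set.nodup_ofList mp
  have hmemu : ∀ {m : String}, m ∈ u → m ∈ mp := fun h => (PySem.Set.mem_ofList mp _).1 h
  -- the four blocks of A's output
  set P0 : List String := if "Baseline agg" ∈ u then ["Baseline agg"] else [] with hP0
  set srcS : List String :=
    PySem.List.sorted (u.filter (fun m => PySem.Str.startswith m "Baseline src ")) pvSrcKey false
    with hsrcS
  set P2 : List String := if "MDCP" ∈ u then ["MDCP"] else [] with hP2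
  set P3 : List String :=
    if (it && decide ("MDCP tuned" ∈ u)) = true then ["MDCP tuned"] else [] with hP3
  -- A's output is the concatenation of the four blocks
  have hA : prepare_method_list_py mp it = P0 ++ srcS ++ P2 ++ P3 := by
    unfold prepare_method_list_py
    simp only [PySem.Set.contains, List.contains_eq_mem, ← hu, decide_eq_true_eq]
    rw [← hP0, ← hsrcS]
    by_cases h2 : "MDCP" ∈ u <;> by_cases h3 : (it && decide ("MDCP tuned" ∈ u)) = true <;>
      simp [h2, h3, hP2, hP3, List.append_assoc]
  rw [hA]
  -- B's output, as a lexicographically keyed sort of the filtered set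
  have hB : prepare_method_list_py_alt mp it
      = PySem.List.sorted
          (u.filter (fun m => (m == "Baseline agg") || pvIsSrc m || (m == "MDCP")
              || (it && (m == "MDCP tuned")))) pvKeyLex false := by
    unfold prepare_method_list_py_alt
    rw [PySem.List.dedup_eq_ofList, ← hu]
    have hq : (fun m => decide (0 ≤ pvRank m) && (it || !(m == "MDCP tuned")))
        = (fun m => (m == "Baseline agg") || pvIsSrc m || (m == "MDCP")
            || (it && (m == "MDCP tuned"))) := funext (pv_qB_eq it)
    rw [hq, pv_sorted2_eq_sorted_lex]
    rfl
  rw [hB]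
  -- conclude by naming the sorted order
  apply Eq.symm
  apply PySem.List.sorted_eq_of_perm_of_pairwise_lt
  · -- permutation
    have h0 : P0 = u.filter (fun x => x == "Baseline agg") := by
      rw [pv_filter_beq_of_nodup u hnodup]
    have h2 : P2 = u.filter (fun x => x == "MDCP") := by
      rw [pv_filter_beq_of_nodup u hnodup]
    have h3 : P3 = u.filter (fun x => it && (x == "MDCP tuned")) := by
      cases it with
      | false => simp [hP3]
      | true =>
        rw [hP3]
        simp only [Bool.true_and, decide_eq_true_eq, Bool.true_and]
        rw [pv_filter_beq_of_nodup u hnodup]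
    have hperm1 : (P0 ++ srcS ++ P2 ++ P3).Perm (P0 ++ u.filter pvIsSrc ++ P2 ++ P3) :=
      (((PySem.List.sorted_perm _ _ _).append_left P0).append_right P2).append_right P3
    refine hperm1.trans ?_
    rw [h0, h2, h3]
    exact pv_perm_four u it
  · -- pairwise strictly increasing lexicographic key
    have hmemP0 : ∀ m ∈ P0, m = "Baseline agg" := by
      rw [hP0]; intro m hm; exact pv_mem_if hm
    have hmemP2 : ∀ m ∈ P2, m = "MDCP" := by
      rw [hP2]; intro m hm; exact pv_mem_if hm
    have hmemP3 : ∀ m ∈ P3, m = "MDCP tuned" := by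
      rw [hP3]; intro m hm; exact pv_mem_if hm
    have hmemS : ∀ m ∈ srcS, pvIsSrc m = true ∧ m ∈ mp := by
      intro m hm
      rw [hsrcS, PySem.List.mem_sorted] at hm
      exact ⟨List.of_mem_filter hm, hmemu (List.mem_of_mem_filter hm)⟩
    have hsingle : ∀ (c : Prop) (inst : Decidable c) (a : String),
        List.Pairwise (fun a b => pvKeyLex a < pvKeyLex b) (if c then [a] else []) := by
      intro c inst a
      split
      · simp
      · exact List.Pairwise.nil
    -- strict pairwise inside the src block
    have hsrc_pw : List.Pairwise (fun a b => pvKeyLex a < pvKeyLex b) srcS := by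
      have hle : List.Pairwise (fun a b => pvSrcKey a ≤ pvSrcKey b) srcS := by
        rw [hsrcS]; exact PySem.List.sorted_pairwise _ _
      have hnd : srcS.Nodup := by
        rw [hsrcS]
        exact ((PySem.List.sorted_perm _ _ _).nodup_iff).2 (hnodup.filter _)
      refine (hle.and hnd).imp_of_mem ?_
      intro a b ha hb hab
      obtain ⟨hsa, hma⟩ := hmemS a ha
      obtain ⟨hsb, hmb⟩ := hmemS b hb
      have hne : pvSrcKey a ≠ pvSrcKey b := fun he =>
        hab.2 (hpre.2 a hma b hmb (by simpa [pvIsSrc] using hsa) (by simpa [pvIsSrc] using hsb) he)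
      exact pv_src_strict hsa hsb hab.1 hne
    -- assemble across the four blocks
    rw [List.pairwise_append, List.pairwise_append, List.pairwise_append]
    refine ⟨⟨⟨by rw [hP0]; exact hsingle _ _ _, hsrc_pw, ?_⟩,
      by rw [hP2]; exact hsingle _ _ _, ?_⟩, by rw [hP3]; exact hsingle _ _ _, ?_⟩
    · intro a ha b hb
      rw [hmemP0 a ha]
      exact pv_lt_of_rank (by rw [pv_rank_agg, pv_rank_src (hmemS b hb).1]; norm_num)
    · intro a ha b hb
      rw [hmemP2 b hb]
      rcases List.mem_append.1 ha with h | h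
      · rw [hmemP0 a h]; exact pv_lt_of_rank (by rw [pv_rank_agg, pv_rank_mdcp]; norm_num)
      · exact pv_lt_of_rank (by rw [pv_rank_src (hmemS a h).1, pv_rank_mdcp]; norm_num)
    · intro a ha b hb
      rw [hmemP3 b hb]
      rcases List.mem_append.1 ha with h | h
      · rcases List.mem_append.1 h with h2 | h2
        · rw [hmemP0 a h2]; exact pv_lt_of_rank (by rw [pv_rank_agg, pv_rank_tuned]; norm_num)
        · exact pv_lt_of_rank (by rw [pv_rank_src (hmemS a h2).1, pv_rank_tuned]; norm_num)
      · rw [hmemP2 a h]; exact pv_lt_of_rank (by rw [pv_rank_mdcp, pv_rank_tuned]; norm_num)
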